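-- pv_equiv track=rewrite | github.com/ChineseResearcher/l33tc0d3-dump | number_theory/Q793 Preimage Size of Factorial Zeroes Function.py | preimageSizeFZF
-- ===== SOURCE A (Python) =====
-- def preimageSizeFZF(k: int) -> int:
--
--     if k == 0: return 5 # 0!, 1!, 2!, 3!, 4!
--
--     k_rem = k
--     # we can observe that:
--     # 1) to obtain a trailing '0' we need a pair of (2, 5) in the factors
--     # e.g. 30 = 2 * 5 * 3, where 1 pair of (2, 5) exists
--
--     # 2) only count of 5 in factors is the limiting factor as the count of
--     # 2 grows much faster than 5
--
--     # 3) for below non-overlapping ranges, we observe the count of 5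
--     # contributed by each range
--     # [0, 5] -> 1
--     # (5, 25] -> 5
--     # (25, 125] -> 25
--     # (125, 625] -> 125
--     # (625, 3125] -> 625
--     # There is a geometric relationship here:
--     # If we search up to number 5^p, we obtain count of 5 equal to sum of
--     # geometric series 5^0 + 5^1 + 5^2 + .... + 5^(p-1)
--
--     # 4) we need to further apply bianry search if k is not a sum of geometric series
--     p = 1
--     while True:
--         k_rem -= pow(5, p-1)
--         if k_rem - pow(5, p) < 0:
--             break
--         p += 1
--
--     # a perfect sum of geometric series
--     if k_rem == 0: return 5
--
--     # binary search on range [5^p + 1, 5^(p+1)]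
--     l, r = pow(5, p) + 1, pow(5, p + 1)
--     fac = [pow(5, i) for i in range(1, p+2)]
--
--     ans = 0
--     while l <= r:
--
--         mid = (l + r) // 2
--
--         cnt_5 = 0
--         for f in fac:
--             cnt_5 += mid // f
--
--         # found the number in range [l, r] with
--         # k occurrences of 5 in its factors
--         if cnt_5 == k:
--             ans = 5
--             break
--         elif cnt_5 > k:
--             r = mid - 1
--         elif cnt_5 < k:
--             l = mid + 1
--
--     return ans
-- ===== SOURCE B (Python) =====
-- def preimageSizeFZF(k: int) -> int:
--     # Direct binary search over n in [0, 5*(k+1)] for zeros(n) == k.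
--     def zeros(n):
--         c = 0
--         while n > 0:
--             n //= 5
--             c += n
--         return c
--     lo, hi = 0, 5 * (k + 1)
--     while lo <= hi:
--         mid = (lo + hi) // 2
--         z = zeros(mid)
--         if z == k:
--             return 5
--         if z < k:
--             lo = mid + 1
--         else:
--             hi = mid - 1
--     return 0
-- ===== Notes on version B (the rewrite author's own statement) =====
-- stated objective: simpler
-- what changed: A first locates the power-of-five range containing the preimage via a geometric-series subtraction loop and then binary-searches inside that range using a precomputed list of powers of five; B does one direct binary search over the whole candidate interval with a plain trailing-zeros counter, with no range-finding phase and no power list.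
import Mathlib
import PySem

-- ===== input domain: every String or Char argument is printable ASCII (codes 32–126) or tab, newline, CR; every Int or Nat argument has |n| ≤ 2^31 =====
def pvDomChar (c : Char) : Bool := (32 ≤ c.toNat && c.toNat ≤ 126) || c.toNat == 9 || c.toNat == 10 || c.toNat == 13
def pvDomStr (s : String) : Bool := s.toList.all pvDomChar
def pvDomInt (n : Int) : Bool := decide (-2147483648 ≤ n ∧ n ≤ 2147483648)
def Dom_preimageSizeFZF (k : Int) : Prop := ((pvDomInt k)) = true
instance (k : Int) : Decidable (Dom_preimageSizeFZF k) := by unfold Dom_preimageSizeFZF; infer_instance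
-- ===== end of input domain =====

-- B replaces A's geometric-series range narrowing plus inner binary search by one direct
-- binary search over n in [0, 5*(k+1)] for zeros(n) = k (objective: simpler).

-- ===== PORT A =====
-- the `while True` loop computing p and k_rem (exponents are taken with .toNat: p starts at 1 and only grows, so they are nonnegative)
def pvPhase2 (krem p : Int) : Int × Int :=
  if krem - 5 ^ (p - 1).toNat - 5 ^ p.toNat < 0 then (krem - 5 ^ (p - 1).toNat, p)
  else pvPhase2 (krem - 5 ^ (p - 1).toNat) (p + 1)
termination_by krem.toNat
decreasing_by
  have h1 : (1:Int) ≤ 5 ^ (p - 1).toNat := one_le_pow₀ (by norm_num)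
  have h2 : (1:Int) ≤ 5 ^ p.toNat := one_le_pow₀ (by norm_num)
  omega

-- the `while l <= r` binary search with cnt_5 accumulated over the fac list;
-- the final `elif cnt_5 < k` is the only case left after the first two tests, so it ports as `else`
def pvSearchA (fac : List Int) (k l r : Int) : Int :=
  if h : l ≤ r then
    let mid := PySem.Int.floordiv (l + r) 2
    let cnt := fac.foldl (fun c f => c + PySem.Int.floordiv mid f) 0
    if cnt = k then 5
    else if cnt > k then pvSearchA fac k l (mid - 1)
    else pvSearchA fac k (mid + 1) r
  else 0
termination_by (r + 1 - l).toNat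
decreasing_by
  all_goals have hb := PySem.Int.floordiv_two_mid_bounds h
  all_goals omega

def preimageSizeFZF (k : Int) : Int :=
  if k = 0 then 5
  else
    let pr := pvPhase2 k 1
    if pr.1 = 0 then 5
    else
      pvSearchA ((PySem.List.pyRange 1 (pr.2 + 2) 1).map (fun i => (5:Int) ^ i.toNat)) k
        ((5:Int) ^ pr.2.toNat + 1) ((5:Int) ^ (pr.2 + 1).toNat)

-- ===== PORT B =====
-- helper zeros(n): while n > 0: n //= 5; c += n
def pvZeros (n : Int) : Int :=
  if 0 < n then PySem.Int.floordiv n 5 + pvZeros (PySem.Int.floordiv n 5)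
  else 0
termination_by n.toNat
decreasing_by
  rw [PySem.Int.floordiv_eq_ediv_of_pos (by norm_num)]
  omega

def pvSearchB (k l r : Int) : Int :=
  if h : l ≤ r then
    let mid := PySem.Int.floordiv (l + r) 2
    if pvZeros mid = k then 5
    else if pvZeros mid < k then pvSearchB k (mid + 1) r
    else pvSearchB k l (mid - 1)
  else 0
termination_by (r + 1 - l).toNat
decreasing_by
  all_goals have hb := PySem.Int.floordiv_two_mid_bounds h
  all_goals omega

def preimageSizeFZF_alt (k : Int) : Int := pvSearchB k 0 (5 * (k + 1))

-- ===== PRECONDITION & SPEC =====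
def Spec_preimageSizeFZF (k : Int) (out : Int) : Prop := out = preimageSizeFZF_alt k
instance (k : Int) (out : Int) : Decidable (Spec_preimageSizeFZF k out) := by unfold Spec_preimageSizeFZF; infer_instance

-- ===== CLAIM (what is proved, stated in full; the proofs are below) =====
def Claim_equal_preimageSizeFZF : Prop := ∀ (k : Int), Dom_preimageSizeFZF k → Spec_preimageSizeFZF k (preimageSizeFZF k)

-- ===== LEMMAS AND PROOFS =====

-- G p = 5^0 + … + 5^(p-1) = number of factors 5 in (5^p)!
def pvG : Nat → Int
  | 0 => 0
  | p + 1 => pvG p + 5 ^ p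

theorem pvZeros_nonneg (n : Int) : 0 ≤ pvZeros n := by
  induction n using pvZeros.induct with
  | case1 n h ih =>
    rw [pvZeros, if_pos h]
    have : 0 ≤ PySem.Int.floordiv n 5 := by
      rw [PySem.Int.floordiv_eq_ediv_of_pos (by norm_num)]; omega
    omega
  | case2 n h => rw [pvZeros, if_neg h]

theorem pvZeros_mono {a b : Int} (ha : 0 ≤ a) (hab : a ≤ b) : pvZeros a ≤ pvZeros b := by
  induction b using pvZeros.induct generalizing a with
  | case1 b h ih =>
    rw [pvZeros.eq_def b, if_pos h]
    by_cases h0 : 0 < a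
    · rw [pvZeros.eq_def a, if_pos h0]
      have hd : PySem.Int.floordiv a 5 ≤ PySem.Int.floordiv b 5 := by
        rw [PySem.Int.floordiv_eq_ediv_of_pos (by norm_num),
            PySem.Int.floordiv_eq_ediv_of_pos (by norm_num)]
        exact Int.ediv_le_ediv (by norm_num) hab
      have hd0 : 0 ≤ PySem.Int.floordiv a 5 := by
        rw [PySem.Int.floordiv_eq_ediv_of_pos (by norm_num)]; omega
      have := ih hd0 hd
      omega
    · rw [pvZeros.eq_def a, if_neg h0]
      have h1 := pvZeros_nonneg (PySem.Int.floordiv b 5)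
      have : 0 ≤ PySem.Int.floordiv b 5 := by
        rw [PySem.Int.floordiv_eq_ediv_of_pos (by norm_num)]; omega
      omega
  | case2 b h =>
    have : a = 0 ∨ a < 0 := by omega
    rw [pvZeros.eq_def a, if_neg (by omega), pvZeros.eq_def b, if_neg h]

theorem pvZeros_5mul {m : Int} (hm : 0 ≤ m) : pvZeros (5 * m) = m + pvZeros m := by
  rcases eq_or_lt_of_le hm with h | h
  · rw [← h]
    norm_num
  · rw [pvZeros, if_pos (by omega)]
    have : PySem.Int.floordiv (5 * m) 5 = m := by
      rw [PySem.Int.floordiv_eq_ediv_of_pos (by norm_num)]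
      exact Int.mul_ediv_cancel_left m (by norm_num)
    rw [this]

theorem pvZeros_small {n : Int} (h0 : 0 ≤ n) (h5 : n < 5) : pvZeros n = 0 := by
  rw [pvZeros]
  split_ifs with h
  · have : PySem.Int.floordiv n 5 = 0 := by
      rw [PySem.Int.floordiv_eq_ediv_of_pos (by norm_num)]
      omega
    rw [this, pvZeros]
    norm_num
  · rfl

theorem pvZeros_pow (p : Nat) : pvZeros ((5:Int) ^ p) = pvG p := by
  induction p with
  | zero => simp [pvZeros, pvG, PySem.Int.floordiv]
  | succ p ih =>
    rw [pvZeros, if_pos (by positivity)]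
    have : PySem.Int.floordiv ((5:Int) ^ (p+1)) 5 = 5 ^ p := by
      rw [PySem.Int.floordiv_eq_ediv_of_pos (by norm_num), pow_succ]
      exact Int.mul_ediv_cancel _ (by norm_num)
    rw [this, ih, pvG]; ring

-- truncated sum T m n = n//5 + n//25 + … + n//5^(m+1) = what A's fac-list foldl computes
def pvT : Nat → Int → Int
  | 0, n => PySem.Int.floordiv n 5
  | m + 1, n => pvT m n + PySem.Int.floordiv n (5 ^ (m + 2))

theorem pvT_head (m : Nat) (n : Int) :
    pvT (m + 1) n = PySem.Int.floordiv n 5 + pvT m (PySem.Int.floordiv n 5) := by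
  induction m with
  | zero =>
    simp only [pvT]
    rw [PySem.Int.floordiv_eq_ediv_of_pos (b := 5) (by norm_num),
        PySem.Int.floordiv_eq_ediv_of_pos (by norm_num),
        PySem.Int.floordiv_eq_ediv_of_pos (by norm_num)]
    rw [Int.ediv_ediv_of_nonneg (by norm_num)]
    norm_num
  | succ m ih =>
    show pvT (m+1) n + PySem.Int.floordiv n (5 ^ (m+3)) = _
    rw [ih]
    show _ = PySem.Int.floordiv n 5 + (pvT m (PySem.Int.floordiv n 5) + PySem.Int.floordiv (PySem.Int.floordiv n 5) (5 ^ (m+2)))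
    have : PySem.Int.floordiv (PySem.Int.floordiv n 5) (5 ^ (m+2)) = PySem.Int.floordiv n (5 ^ (m+3)) := by
      rw [PySem.Int.floordiv_eq_ediv_of_pos (by norm_num),
          PySem.Int.floordiv_eq_ediv_of_pos (by positivity),
          PySem.Int.floordiv_eq_ediv_of_pos (by positivity),
          Int.ediv_ediv_of_nonneg (by norm_num)]
      ring_nf
    rw [this]; ring

theorem pvT_mono (m : Nat) {a b : Int} (hab : a ≤ b) : pvT m a ≤ pvT m b := by
  induction m with
  | zero =>
    simp only [pvT]
    rw [PySem.Int.floordiv_eq_ediv_of_pos (by norm_num), PySem.Int.floordiv_eq_ediv_of_pos (by norm_num)]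
    exact Int.ediv_le_ediv (by norm_num) hab
  | succ m ih =>
    simp only [pvT]
    have : PySem.Int.floordiv a (5^(m+2)) ≤ PySem.Int.floordiv b (5^(m+2)) := by
      rw [PySem.Int.floordiv_eq_ediv_of_pos (by positivity), PySem.Int.floordiv_eq_ediv_of_pos (by positivity)]
      exact Int.ediv_le_ediv (by positivity) hab
    omega

theorem pvT_nonneg (m : Nat) {n : Int} (hn : 0 ≤ n) : 0 ≤ pvT m n := by
  induction m with
  | zero =>
    simp only [pvT]
    rw [PySem.Int.floordiv_eq_ediv_of_pos (by norm_num)]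
    exact Int.ediv_nonneg hn (by norm_num)
  | succ m ih =>
    simp only [pvT]
    have : 0 ≤ PySem.Int.floordiv n (5^(m+2)) := by
      rw [PySem.Int.floordiv_eq_ediv_of_pos (by positivity)]
      exact Int.ediv_nonneg hn (by positivity)
    omega

theorem pvT_eq_zeros (m : Nat) : ∀ n : Int, 0 ≤ n → n < 5 ^ (m + 2) → pvT m n = pvZeros n := by
  induction m with
  | zero =>
    intro n h0 h25
    simp only [pvT]
    rw [pvZeros]
    have hd0 : 0 ≤ PySem.Int.floordiv n 5 := by
      rw [PySem.Int.floordiv_eq_ediv_of_pos (by norm_num)]; exact Int.ediv_nonneg h0 (by norm_num)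
    have hd5 : PySem.Int.floordiv n 5 < 5 := by
      rw [PySem.Int.floordiv_eq_ediv_of_pos (by norm_num)]; omega
    split_ifs with h
    · rw [pvZeros_small hd0 hd5]; ring
    · have : n = 0 := by omega
      subst this
      simp [PySem.Int.floordiv]
  | succ m ih =>
    intro n h0 hlt
    rw [pvT_head, pvZeros]
    have hd0 : 0 ≤ PySem.Int.floordiv n 5 := by
      rw [PySem.Int.floordiv_eq_ediv_of_pos (by norm_num)]; exact Int.ediv_nonneg h0 (by norm_num)
    have hdlt : PySem.Int.floordiv n 5 < 5 ^ (m + 2) := by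
      rw [PySem.Int.floordiv_eq_ediv_of_pos (by norm_num)]
      have h5 : (5:Int) ^ (m+1+2) = 5 ^ (m+2) * 5 := by ring
      omega
    split_ifs with h
    · rw [ih _ hd0 hdlt]
    · have : n = 0 := by omega
      subst this
      have : PySem.Int.floordiv (0:Int) 5 = 0 := by decide
      rw [this, ih 0 le_rfl (by positivity), pvZeros_small le_rfl (by norm_num)]
      norm_num

theorem pvCnt_eq_T (m : Nat) (n : Int) :
    (((PySem.List.pyRange 1 ((m:Int) + 3) 1).map (fun i => (5:Int) ^ i.toNat)).foldl
      (fun c f => c + PySem.Int.floordiv n f) 0) = pvT (m + 1) n := by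
  induction m with
  | zero =>
    have h3 : PySem.List.pyRange 1 ((0:Nat) + 3 : Int) 1 = [1, 2] := by decide
    push_cast at h3 ⊢
    rw [h3]
    simp only [List.map, List.foldl, pvT]
    norm_num [show Int.toNat 1 = 1 from rfl, show Int.toNat 2 = 2 from rfl]
  | succ m ih =>
    have hsplit : PySem.List.pyRange 1 ((m:Int) + 1 + 3) 1
        = PySem.List.pyRange 1 ((m:Int) + 3) 1 ++ [(m:Int) + 3] := by
      have := PySem.List.pyRange_one_succ_right (a := 1) (b := (m:Int) + 3) (by omega)
      rw [show (m:Int) + 1 + 3 = ((m:Int) + 3) + 1 by ring, this]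
    push_cast
    rw [hsplit, List.map_append, List.foldl_append]
    push_cast at ih
    rw [ih]
    simp only [List.map, List.foldl]
    show pvT (m + 2) n = _
    norm_num

theorem pvG_succ_sub (p : Int) (hp : 1 ≤ p) :
    pvG p.toNat - pvG (p - 1).toNat = 5 ^ (p - 1).toNat := by
  have h : p.toNat = (p - 1).toNat + 1 := by omega
  rw [h, pvG]
  ring

theorem pvPhase2_spec : ∀ (N : Nat) (krem p : Int), krem.toNat ≤ N → 1 ≤ p →
    5 ^ (p - 1).toNat ≤ krem →
    ∃ q : Int, p ≤ q ∧
      pvPhase2 krem p = (krem - (pvG q.toNat - pvG (p - 1).toNat), q) ∧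
      0 ≤ krem - (pvG q.toNat - pvG (p - 1).toNat) ∧
      krem - (pvG q.toNat - pvG (p - 1).toNat) < 5 ^ q.toNat := by
  intro N
  induction N with
  | zero =>
    intro krem p hN hp hk
    have h1 : (1:Int) ≤ 5 ^ (p - 1).toNat := one_le_pow₀ (by norm_num)
    omega
  | succ N ih =>
    intro krem p hN hp hk
    rw [pvPhase2]
    split_ifs with hbr
    · refine ⟨p, le_rfl, ?_, ?_, ?_⟩
      · rw [pvG_succ_sub p hp]
      · rw [pvG_succ_sub p hp]; omega
      · rw [pvG_succ_sub p hp]; omega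
    · have h1 : (1:Int) ≤ 5 ^ (p - 1).toNat := one_le_pow₀ (by norm_num)
      have h2 : (1:Int) ≤ 5 ^ p.toNat := one_le_pow₀ (by norm_num)
      have hstep : 5 ^ ((p + 1) - 1).toNat ≤ krem - 5 ^ (p - 1).toNat := by
        have : ((p + 1) - 1).toNat = p.toNat := by omega
        rw [this]; omega
      obtain ⟨q, hq1, hq2, hq3, hq4⟩ :=
        ih (krem - 5 ^ (p - 1).toNat) (p + 1) (by omega) (by omega) hstep
      refine ⟨q, by omega, ?_, ?_, ?_⟩
      · have hG : pvG ((p + 1) - 1).toNat = pvG (p - 1).toNat + 5 ^ (p - 1).toNat := by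
          have h : ((p + 1) - 1).toNat = (p - 1).toNat + 1 := by omega
          rw [h, pvG]
        have harith : krem - 5 ^ (p - 1).toNat - (pvG q.toNat - pvG ((p + 1) - 1).toNat)
            = krem - (pvG q.toNat - pvG (p - 1).toNat) := by rw [hG]; ring
        rw [hq2, harith]
      · have hG : pvG ((p + 1) - 1).toNat = pvG (p - 1).toNat + 5 ^ (p - 1).toNat := by
          have h : ((p + 1) - 1).toNat = (p - 1).toNat + 1 := by omega
          rw [h, pvG]
        rw [hG] at hq3
        omega
      · have hG : pvG ((p + 1) - 1).toNat = pvG (p - 1).toNat + 5 ^ (p - 1).toNat := by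
          have h : ((p + 1) - 1).toNat = (p - 1).toNat + 1 := by omega
          rw [h, pvG]
        rw [hG] at hq4
        omega

theorem pvSearchB_spec (k : Int) : ∀ (N : Nat) (l r : Int), (r + 1 - l).toNat ≤ N → 0 ≤ l →
    (∀ n : Int, 0 ≤ n → pvZeros n = k → l ≤ n ∧ n ≤ r) →
    ((∃ n : Int, 0 ≤ n ∧ pvZeros n = k) → pvSearchB k l r = 5) ∧
    (¬(∃ n : Int, 0 ≤ n ∧ pvZeros n = k) → pvSearchB k l r = 0) := by
  intro N
  induction N with
  | zero =>
    intro l r hN hl hcont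
    have hlr : ¬ l ≤ r := by omega
    rw [pvSearchB, dif_neg hlr]
    constructor
    · rintro ⟨n, hn, he⟩
      have := hcont n hn he
      omega
    · intro _; rfl
  | succ N ih =>
    intro l r hN hl hcont
    by_cases hlr : l ≤ r
    · have hmb := PySem.Int.floordiv_two_mid_bounds hlr
      set mid := PySem.Int.floordiv (l + r) 2 with hmiddef
      have hmid0 : 0 ≤ mid := by omega
      rcases lt_trichotomy (pvZeros mid) k with hz | hz | hz
      · -- zeros mid < k : recurse right
        have heq : pvSearchB k l r = pvSearchB k (mid + 1) r := by
          rw [pvSearchB, dif_pos hlr]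
          simp only [← hmiddef, if_neg (by omega : ¬ pvZeros mid = k), if_pos hz]
        have hcont' : ∀ n : Int, 0 ≤ n → pvZeros n = k → mid + 1 ≤ n ∧ n ≤ r := by
          intro n hn he
          have h1 := hcont n hn he
          have h2 : ¬ n ≤ mid := by
            intro hle
            have := pvZeros_mono hn hle
            omega
          omega
        have := ih (mid + 1) r (by omega) (by omega) hcont'
        rw [heq]
        exact this
      · -- found
        have heq : pvSearchB k l r = 5 := by
          rw [pvSearchB, dif_pos hlr]
          simp only [← hmiddef, if_pos hz]
        constructor
        · intro _; exact heq
        · intro hne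
          exact absurd ⟨mid, hmid0, hz⟩ hne
      · -- zeros mid > k : recurse left
        have heq : pvSearchB k l r = pvSearchB k l (mid - 1) := by
          rw [pvSearchB, dif_pos hlr]
          simp only [← hmiddef, if_neg (by omega : ¬ pvZeros mid = k), if_neg (by omega : ¬ pvZeros mid < k)]
        have hcont' : ∀ n : Int, 0 ≤ n → pvZeros n = k → l ≤ n ∧ n ≤ mid - 1 := by
          intro n hn he
          have h1 := hcont n hn he
          have h2 : ¬ mid ≤ n := by
            intro hle
            have := pvZeros_mono hmid0 hle
            omega
          omega
        have := ih l (mid - 1) (by omega) hl hcont'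
        rw [heq]
        exact this
    · rw [pvSearchB, dif_neg hlr]
      constructor
      · rintro ⟨n, hn, he⟩
        have := hcont n hn he
        omega
      · intro _; rfl

theorem pvSearchA_spec (k : Int) (m : Nat) : ∀ (N : Nat) (l r : Int), (r + 1 - l).toNat ≤ N → 0 ≤ l →
    (∀ n : Int, 0 ≤ n → pvT (m + 1) n = k → l ≤ n ∧ n ≤ r) →
    ((∃ n : Int, 0 ≤ n ∧ pvT (m + 1) n = k) →
      pvSearchA ((PySem.List.pyRange 1 ((m:Int) + 3) 1).map (fun i => (5:Int) ^ i.toNat)) k l r = 5) ∧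
    (¬(∃ n : Int, 0 ≤ n ∧ pvT (m + 1) n = k) →
      pvSearchA ((PySem.List.pyRange 1 ((m:Int) + 3) 1).map (fun i => (5:Int) ^ i.toNat)) k l r = 0) := by
  intro N
  induction N with
  | zero =>
    intro l r hN hl hcont
    have hlr : ¬ l ≤ r := by omega
    rw [pvSearchA, dif_neg hlr]
    constructor
    · rintro ⟨n, hn, he⟩
      have := hcont n hn he
      omega
    · intro _; rfl
  | succ N ih =>
    intro l r hN hl hcont
    by_cases hlr : l ≤ r
    · have hmb := PySem.Int.floordiv_two_mid_bounds hlr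
      set mid := PySem.Int.floordiv (l + r) 2 with hmiddef
      have hmid0 : 0 ≤ mid := by omega
      have hcntT := pvCnt_eq_T m mid
      rcases lt_trichotomy (pvT (m + 1) mid) k with hz | hz | hz
      · have heq : pvSearchA ((PySem.List.pyRange 1 ((m:Int) + 3) 1).map (fun i => (5:Int) ^ i.toNat)) k l r
            = pvSearchA ((PySem.List.pyRange 1 ((m:Int) + 3) 1).map (fun i => (5:Int) ^ i.toNat)) k (mid + 1) r := by
          rw [pvSearchA, dif_pos hlr]
          simp only [← hmiddef, hcntT, if_neg (by omega : ¬ pvT (m + 1) mid = k),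
            if_neg (by omega : ¬ pvT (m + 1) mid > k)]
        have hcont' : ∀ n : Int, 0 ≤ n → pvT (m + 1) n = k → mid + 1 ≤ n ∧ n ≤ r := by
          intro n hn he
          have h1 := hcont n hn he
          have h2 : ¬ n ≤ mid := by
            intro hle
            have := pvT_mono (m + 1) hle
            omega
          omega
        rw [heq]
        exact ih (mid + 1) r (by omega) (by omega) hcont'
      · have heq : pvSearchA ((PySem.List.pyRange 1 ((m:Int) + 3) 1).map (fun i => (5:Int) ^ i.toNat)) k l r = 5 := by
          rw [pvSearchA, dif_pos hlr]
          simp only [← hmiddef, hcntT, if_pos hz]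
        constructor
        · intro _; exact heq
        · intro hne
          exact absurd ⟨mid, hmid0, hz⟩ hne
      · have heq : pvSearchA ((PySem.List.pyRange 1 ((m:Int) + 3) 1).map (fun i => (5:Int) ^ i.toNat)) k l r
            = pvSearchA ((PySem.List.pyRange 1 ((m:Int) + 3) 1).map (fun i => (5:Int) ^ i.toNat)) k l (mid - 1) := by
          rw [pvSearchA, dif_pos hlr]
          simp only [← hmiddef, hcntT, if_neg (by omega : ¬ pvT (m + 1) mid = k),
            if_pos (by omega : pvT (m + 1) mid > k)]
        have hcont' : ∀ n : Int, 0 ≤ n → pvT (m + 1) n = k → l ≤ n ∧ n ≤ mid - 1 := by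
          intro n hn he
          have h1 := hcont n hn he
          have h2 : ¬ mid ≤ n := by
            intro hle
            have := pvT_mono (m + 1) hle
            omega
          omega
        rw [heq]
        exact ih l (mid - 1) (by omega) hl hcont'
    · rw [pvSearchA, dif_neg hlr]
      constructor
      · rintro ⟨n, hn, he⟩
        have := hcont n hn he
        omega
      · intro _; rfl

theorem pvAlt_eq (k : Int) :
    (((∃ n : Int, 0 ≤ n ∧ pvZeros n = k) → preimageSizeFZF_alt k = 5) ∧
     (¬(∃ n : Int, 0 ≤ n ∧ pvZeros n = k) → preimageSizeFZF_alt k = 0)) := by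
  have hcont : ∀ n : Int, 0 ≤ n → pvZeros n = k → 0 ≤ n ∧ n ≤ 5 * (k + 1) := by
    intro n hn he
    refine ⟨hn, ?_⟩
    by_contra hgt
    push Not at hgt
    have hk0 : 0 ≤ k := he ▸ pvZeros_nonneg n
    have h51 : pvZeros (5 * (k + 1)) = (k + 1) + pvZeros (k + 1) := pvZeros_5mul (by omega)
    have h52 : pvZeros (5 * (k + 1)) ≤ pvZeros n := pvZeros_mono (by omega) (by omega)
    have h53 := pvZeros_nonneg (k + 1)
    omega
  exact pvSearchB_spec k (5 * (k + 1) + 1 - 0).toNat 0 (5 * (k + 1)) (by omega) le_rfl hcont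

theorem preimageSizeFZF_spec' (k : Int) : preimageSizeFZF k = preimageSizeFZF_alt k := by
  have halt := pvAlt_eq k
  by_cases hk0 : k = 0
  · subst hk0
    have hz0 : pvZeros 0 = 0 := pvZeros_small le_rfl (by norm_num)
    rw [preimageSizeFZF, if_pos rfl, halt.1 ⟨0, le_rfl, hz0⟩]
  · by_cases hkneg : k < 0
    · -- phase2 breaks immediately: (k - 1, 1); binary search finds nothing
      have hNoZ : ¬ (∃ n : Int, 0 ≤ n ∧ pvZeros n = k) := by
        rintro ⟨n, hn, he⟩
        have := pvZeros_nonneg n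
        omega
      have hphase : pvPhase2 k 1 = (k - 1, 1) := by
        rw [pvPhase2]
        norm_num
        omega
      rw [preimageSizeFZF, if_neg hk0]
      simp only [hphase]
      rw [if_neg (by omega : ¬ k - 1 = 0)]
      have hcont : ∀ n : Int, 0 ≤ n → pvT (0 + 1) n = k → (5:Int) ^ (1:Int).toNat + 1 ≤ n ∧ n ≤ (5:Int) ^ ((1:Int) + 1).toNat := by
        intro n hn he
        have := pvT_nonneg (0 + 1) hn
        omega
      have hNoT : ¬ (∃ n : Int, 0 ≤ n ∧ pvT (0 + 1) n = k) := by
        rintro ⟨n, hn, he⟩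
        have := pvT_nonneg (0 + 1) hn
        omega
      have hA := (pvSearchA_spec k 0 ((5:Int) ^ ((1:Int) + 1).toNat + 1 - ((5:Int) ^ (1:Int).toNat + 1)).toNat
        ((5:Int) ^ (1:Int).toNat + 1) ((5:Int) ^ ((1:Int) + 1).toNat) (by omega)
        (by norm_num) hcont).2 hNoT
      have hcast : ((0:Nat):Int) + 3 = (1:Int) + 2 := by norm_num
      rw [hcast] at hA
      rw [hA, halt.2 hNoZ]
    · -- k ≥ 1
      have hk1 : 1 ≤ k := by omega
      obtain ⟨q, hq1, hq2, hq3, hq4⟩ := pvPhase2_spec k.toNat k 1 le_rfl le_rfl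
        (by simp only [show ((1:Int) - 1).toNat = 0 from rfl, pow_zero]; exact hk1)
      have hG0 : pvG ((1:Int) - 1).toNat = 0 := rfl
      rw [hG0] at hq2 hq3 hq4
      rw [preimageSizeFZF, if_neg hk0]
      simp only [hq2]
      by_cases hkr : k - (pvG q.toNat - 0) = 0
      · rw [if_pos hkr]
        have hzq : pvZeros ((5:Int) ^ q.toNat) = pvG q.toNat := pvZeros_pow q.toNat
        refine (halt.1 ⟨(5:Int) ^ q.toNat, by positivity, ?_⟩).symm
        omega
      · rw [if_neg hkr]
        set m : Nat := (q - 1).toNat with hmdef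
        have hqm : q.toNat = m + 1 := by omega
        have hqmi : q = (m:Int) + 1 := by omega
        have hq1m : (q + 1).toNat = m + 2 := by omega
        have hlow : pvG (m + 1) < k := by rw [← hqm]; omega
        have hhigh : k < pvG (m + 2) := by
          have h2 : pvG (m + 2) = pvG (m + 1) + 5 ^ (m + 1) := by rw [pvG]
          rw [← hqm] at h2
          omega
        have hzlow : pvZeros ((5:Int) ^ (m + 1)) = pvG (m + 1) := pvZeros_pow (m + 1)
        have hzhigh : pvZeros ((5:Int) ^ (m + 2)) = pvG (m + 2) := pvZeros_pow (m + 2)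
        have hpowlt : (5:Int) ^ (m + 1) < 5 ^ (m + 1 + 2) := by
          apply pow_lt_pow_right₀ (by norm_num) (by omega)
        have hpowlt2 : (5:Int) ^ (m + 2) < 5 ^ (m + 1 + 2) := by
          apply pow_lt_pow_right₀ (by norm_num) (by omega)
        have hcont : ∀ n : Int, 0 ≤ n → pvT (m + 1) n = k →
            (5:Int) ^ (m + 1) + 1 ≤ n ∧ n ≤ (5:Int) ^ (m + 2) := by
          intro n hn he
          constructor
          · by_contra hle
            push Not at hle
            have hnlt : n < 5 ^ (m + 1 + 2) := by omega
            have h1 : pvT (m + 1) n = pvZeros n := pvT_eq_zeros (m + 1) n hn hnlt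
            have h2 : pvZeros n ≤ pvZeros ((5:Int) ^ (m + 1)) := pvZeros_mono hn (by omega)
            omega
          · by_contra hgt
            push Not at hgt
            have h1 : pvT (m + 1) ((5:Int) ^ (m + 2)) = pvZeros ((5:Int) ^ (m + 2)) :=
              pvT_eq_zeros (m + 1) _ (by positivity) (by omega)
            have h2 : pvT (m + 1) ((5:Int) ^ (m + 2)) ≤ pvT (m + 1) n :=
              pvT_mono (m + 1) (by omega)
            omega
        have hiff : (∃ n : Int, 0 ≤ n ∧ pvT (m + 1) n = k) ↔ (∃ n : Int, 0 ≤ n ∧ pvZeros n = k) := by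
          constructor
          · rintro ⟨n, hn, he⟩
            obtain ⟨hb1, hb2⟩ := hcont n hn he
            exact ⟨n, hn, by rw [← pvT_eq_zeros (m + 1) n hn (by omega)]; exact he⟩
          · rintro ⟨n, hn, he⟩
            have hb1 : (5:Int) ^ (m + 1) + 1 ≤ n := by
              by_contra hle
              push Not at hle
              have h2 : pvZeros n ≤ pvZeros ((5:Int) ^ (m + 1)) := pvZeros_mono hn (by omega)
              omega
            have hb2 : n ≤ (5:Int) ^ (m + 2) := by
              by_contra hgt
              push Not at hgt
              have h2 : pvZeros ((5:Int) ^ (m + 2)) ≤ pvZeros n := pvZeros_mono (by positivity) (by omega)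
              omega
            exact ⟨n, hn, by rw [pvT_eq_zeros (m + 1) n hn (by omega)]; exact he⟩
        have hA := pvSearchA_spec k m ((5:Int) ^ (m + 2) + 1 - ((5:Int) ^ (m + 1) + 1)).toNat
          ((5:Int) ^ (m + 1) + 1) ((5:Int) ^ (m + 2)) (by omega) (by positivity) hcont
        rw [show q + 2 = ((m:Int) + 3) from by omega, hqm, hq1m]
        by_cases hex : ∃ n : Int, 0 ≤ n ∧ pvZeros n = k
        · rw [hA.1 (hiff.mpr hex), halt.1 hex]
        · rw [hA.2 (fun h => hex (hiff.mp h)), halt.2 hex]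

-- ===== VERDICT (by name: the statement is the Claim_ definition above) =====
theorem preimageSizeFZF_spec : Claim_equal_preimageSizeFZF := by
  intro k _hdom
  unfold Spec_preimageSizeFZF
  exact preimageSizeFZF_spec' k
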